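-- pv_equiv track=rewrite | github.com/danos/vyatta-cpu-shield | usr/lib/python3/dist-packages/vyatta/cpuset.py | _mask_to_range
-- ===== SOURCE A (Python) =====
-- def _mask_to_range(mask):
--     """ Convert a mask of cpus into a range of cpus. """
--     cpus = mask[::-1] # reverse the string
--     all_cpus = ""
--
--     start = -1
--     last = 0
--     count = 0
--     sep = ''
--     for char in cpus:
--         for i in range(0, 4):
--             char_mask = 1 << i
--             if char_mask & int(char, 16):
--                 bit = i + count
--                 # bit is set.
--                 if start >= 0:
--                     if bit == last + 1:
--                         # continuation of range
--                         last = bit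
--                 else:
--                     #start of new range
--                     start = bit
--                     last = bit
--                     all_cpus += sep + str(bit)
--                     sep = ','
--             else:
--                 if start >= 0:
--                     if start != last:
--                         #end of range
--                         all_cpus += "-" + str(bit)
--                 start = -1
--         count = count + 4
--
--     #Terminate open range
--     if start >= 0:
--         if start != last:
--             all_cpus += "-" + str(last)
--
--     return all_cpus
-- ===== SOURCE B (Python) =====
-- def _mask_to_range(mask):
--     """ Convert a mask of cpus into a range of cpus. """
--     # pass 1: collect the set-bit positions (increasing)
--     bits = []
--     for idx, char in enumerate(reversed(mask)):
--         v = int(char, 16)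
--         for i in range(4):
--             if (1 << i) & v:
--                 bits.append(i + 4 * idx)
--     # pass 2: group consecutive positions into runs and format them
--     runs = []
--     for b in bits:
--         if runs and b == runs[-1][1] + 1:
--             runs[-1] = (runs[-1][0], b)
--         else:
--             runs.append((b, b))
--     return ",".join(str(a) if a == b else str(a) + "-" + str(b) for a, b in runs)
-- ===== Notes on version B (the rewrite author's own statement) =====
-- stated objective: simpler
-- what changed: A's inline start/last/sep state machine that emits string pieces while scanning bits is replaced by two plain passes: collect the set-bit positions, then group maximal consecutive runs into (a,b) pairs and join their renderings with commas.
import Mathlib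
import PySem

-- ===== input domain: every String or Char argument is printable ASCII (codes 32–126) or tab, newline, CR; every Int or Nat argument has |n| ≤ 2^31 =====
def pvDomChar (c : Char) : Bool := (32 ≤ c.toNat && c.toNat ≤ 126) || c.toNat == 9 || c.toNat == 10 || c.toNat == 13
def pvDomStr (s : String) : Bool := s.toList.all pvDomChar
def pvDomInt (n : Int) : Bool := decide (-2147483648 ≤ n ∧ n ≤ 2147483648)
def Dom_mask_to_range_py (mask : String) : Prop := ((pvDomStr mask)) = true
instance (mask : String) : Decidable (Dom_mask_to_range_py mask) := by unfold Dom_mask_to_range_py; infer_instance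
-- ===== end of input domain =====

-- B replaces A's inline start/last/sep state machine by two plain passes (collect set-bit
-- positions, then group consecutive runs and join); objective: simpler.

-- ===== PORT A =====
-- A's inner `for i in range(0, 4)` body; state = (all_cpus, start, last, bit, count, sep).
-- `bit` is Python's loop-carried variable `bit` (read in the unset branch), initial 0 is never
-- read before assignment.  int(char, 16) is PySem.Int.ofCharsBase? [char] 16; `none` is exactly
-- Python's ValueError, excluded by Pre_, so `.getD 0` is never taken on admitted inputs.
def pvAinner (char : Char) (s : List Char × Int × Int × Int × Int × List Char) (i : Int) :
    List Char × Int × Int × Int × Int × List Char :=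
  match s with
  | (all_cpus, start, last, bit, count, sep) =>
    let char_mask : Int := 1 <<< i.toNat
    if PySem.Int.band char_mask ((PySem.Int.ofCharsBase? [char] 16).getD 0) ≠ 0 then
      let bit := i + count
      if start ≥ 0 then
        if bit = last + 1 then (all_cpus, start, bit, bit, count, sep)
        else (all_cpus, start, last, bit, count, sep)
      else
        (all_cpus ++ sep ++ PySem.Int.toChars bit, bit, bit, bit, count, [','])
    else
      if start ≥ 0 then
        if start ≠ last then (all_cpus ++ '-' :: PySem.Int.toChars bit, -1, last, bit, count, sep)
        else (all_cpus, -1, last, bit, count, sep)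
      else (all_cpus, -1, last, bit, count, sep)

-- A's outer `for char in cpus` body: the inner loop, then `count = count + 4`.
def pvAchar (st : List Char × Int × Int × Int × Int × List Char) (char : Char) :
    List Char × Int × Int × Int × Int × List Char :=
  match (PySem.List.pyRange 0 4 1).foldl (pvAinner char) st with
  | (a, s1, l, b, c, sp) => (a, s1, l, b, c + 4, sp)

def mask_to_range_py (mask : String) : String :=
  -- cpus = mask[::-1]
  let cpus : List Char := (PySem.List.slice? mask.toList none none (-1)).getD []
  match cpus.foldl pvAchar ([], -1, 0, 0, 0, []) with
  | (all_cpus, start, last, _, _, _) =>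
    String.ofList (if start ≥ 0 ∧ start ≠ last then all_cpus ++ '-' :: PySem.Int.toChars last
               else all_cpus)

-- ===== PORT B =====
-- pass 1: bits.append(i + 4*idx) for every set bit of int(char, 16)
def pvHexBits (mask : String) : List Int :=
  (PySem.List.enumerate mask.toList.reverse 0).foldl (fun bits p =>
    let v := (PySem.Int.ofCharsBase? [p.2] 16).getD 0
    (PySem.List.pyRange 0 4 1).foldl (fun bits i =>
      if PySem.Int.band (1 <<< i.toNat) v ≠ 0 then bits ++ [i + 4 * p.1] else bits) bits) []

-- pass 2 body: extend the last run or open a new one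
def pvRunsStep (runs : List (Int × Int)) (b : Int) : List (Int × Int) :=
  match runs.getLast? with
  | some r => if b = r.2 + 1 then runs.dropLast ++ [(r.1, b)] else runs ++ [(b, b)]
  | none => runs ++ [(b, b)]

-- str(a) if a == b else str(a) + "-" + str(b)
def pvRenderRun (r : Int × Int) : List Char :=
  if r.1 = r.2 then PySem.Int.toChars r.1
  else PySem.Int.toChars r.1 ++ '-' :: PySem.Int.toChars r.2

def mask_to_range_py_alt (mask : String) : String :=
  String.ofList (PySem.Chars.join [','] ((((pvHexBits mask).foldl pvRunsStep []).map pvRenderRun)))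

-- ===== PRECONDITION & SPEC =====
-- Exactly the inputs on which Python A returns: int(char, 16) raises ValueError unless every
-- character is a hexadecimal digit.
def Pre_mask_to_range_py (mask : String) : Prop :=
  (mask.toList.all (fun c =>
    (['0', '1', '2', '3', '4', '5', '6', '7', '8', '9',
      'a', 'b', 'c', 'd', 'e', 'f', 'A', 'B', 'C', 'D', 'E', 'F']).contains c)) = true
instance (mask : String) : Decidable (Pre_mask_to_range_py mask) := by
  unfold Pre_mask_to_range_py; infer_instance
def pvWitness_mask_to_range_py : String := "f5"

def Spec_mask_to_range_py (mask : String) (out : String) : Prop := out = mask_to_range_py_alt mask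
instance (mask : String) (out : String) : Decidable (Spec_mask_to_range_py mask out) := by
  unfold Spec_mask_to_range_py; infer_instance

-- ===== CLAIM (what is proved, stated in full; the proofs are below) =====
def Claim_equal_mask_to_range_py : Prop := ∀ (mask : String), Dom_mask_to_range_py mask → Pre_mask_to_range_py mask → Spec_mask_to_range_py mask (mask_to_range_py mask)

-- ===== LEMMAS AND PROOFS =====

-- Proof-side model of A's loop: state without `count` (the position j is passed explicitly).
abbrev PvSt := List Char × Int × Int × Int × List Char

def pvStep (st : PvSt) (j : Int) (b : Bool) : PvSt :=
  match st with
  | (acc, start, last, bit, sep) =>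
    if b then
      if start ≥ 0 then
        if j = last + 1 then (acc, start, j, j, sep) else (acc, start, last, j, sep)
      else (acc ++ sep ++ PySem.Int.toChars j, j, j, j, [','])
    else
      if start ≥ 0 then
        if start ≠ last then (acc ++ '-' :: PySem.Int.toChars bit, -1, last, bit, sep)
        else (acc, -1, last, bit, sep)
      else (acc, -1, last, bit, sep)

def pvRunM : List Bool → Int → PvSt → PvSt
  | [], _, st => st
  | b :: t, j, st => pvRunM t (j + 1) (pvStep st j b)

def pvFlagsC (c : Char) : List Bool :=
  let v := (PySem.Int.ofCharsBase? [c] 16).getD 0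
  [decide (PySem.Int.band (1 <<< (0 : Int).toNat) v ≠ 0),
   decide (PySem.Int.band (1 <<< (1 : Int).toNat) v ≠ 0),
   decide (PySem.Int.band (1 <<< (2 : Int).toNat) v ≠ 0),
   decide (PySem.Int.band (1 <<< (3 : Int).toNat) v ≠ 0)]

def pvTruePos : List Bool → Int → List Int
  | [], _ => []
  | b :: t, j => (if b then [j] else []) ++ pvTruePos t (j + 1)

def pvOpenAfter : List Bool → Bool → Bool
  | [], o => o
  | b :: t, _ => pvOpenAfter t b

def pvLastOf (R : List (Int × Int)) : Int := ((R.getLast?).map (·.2)).getD 0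
def pvStartOf (R : List (Int × Int)) : Int := ((R.getLast?).map (·.1)).getD 0
def pvSepOf (R : List (Int × Int)) : List Char := if R = [] then [] else [',']
def pvAccOf (R : List (Int × Int)) (o : Bool) : List Char :=
  if o then PySem.Chars.join [','] ((R.dropLast ++ [(pvStartOf R, pvStartOf R)]).map pvRenderRun)
  else PySem.Chars.join [','] (R.map pvRenderRun)
def pvCanon (R : List (Int × Int)) (o : Bool) : PvSt :=
  (pvAccOf R o, if o then pvStartOf R else -1, pvLastOf R, pvLastOf R, pvSepOf R)

def pvInv (R : List (Int × Int)) (o : Bool) (j : Int) : Prop :=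
  0 ≤ j ∧ (∀ r ∈ R, 0 ≤ r.1 ∧ r.1 ≤ r.2) ∧
  (if o then R ≠ [] ∧ pvLastOf R = j - 1 else R = [] ∨ pvLastOf R ≤ j - 2)

def pvEmbed (st : PvSt) (cnt : Int) : List Char × Int × Int × Int × Int × List Char :=
  (st.1, st.2.1, st.2.2.1, st.2.2.2.1, cnt, st.2.2.2.2)

theorem pvJoinSnoc (s y : List Char) (xs : List (List Char)) :
    PySem.Chars.join s (xs ++ [y]) =
      (if xs = [] then [] else PySem.Chars.join s xs ++ s) ++ y := by
  induction xs with
  | nil => simp [PySem.Chars.join_singleton]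
  | cons x t ih =>
    cases t with
    | nil => simp [PySem.Chars.join_cons_cons, PySem.Chars.join_singleton]
    | cons q r =>
      rw [show (x :: q :: r) ++ [y] = x :: ((q :: r) ++ [y]) from rfl]
      rw [show x :: ((q :: r) ++ [y]) = x :: (q :: (r ++ [y])) from rfl]
      rw [PySem.Chars.join_cons_cons, show q :: (r ++ [y]) = (q :: r) ++ [y] from rfl, ih]
      simp [PySem.Chars.join_cons_cons]

theorem pvRunsStep_ext (R : List (Int × Int)) (hne : R ≠ []) (j : Int)
    (hj : j = (R.getLast hne).2 + 1) :
    pvRunsStep R j = R.dropLast ++ [((R.getLast hne).1, j)] := by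
  simp [pvRunsStep, List.getLast?_eq_some_getLast hne, ← hj]

theorem pvRunsStep_new (R : List (Int × Int)) (j : Int)
    (hj : ∀ (hne : R ≠ []), j ≠ (R.getLast hne).2 + 1) :
    pvRunsStep R j = R ++ [(j, j)] := by
  cases hR : R.getLast? with
  | none => simp [pvRunsStep, hR]
  | some r =>
    have hne : R ≠ [] := by rintro rfl; simp at hR
    have : r = R.getLast hne := by
      have := List.getLast?_eq_some_getLast hne; rw [hR] at this; exact Option.some.inj this
    simp [pvRunsStep, hR, this, hj hne]

theorem pvLastOf_concat (dl : List (Int × Int)) (r : Int × Int) :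
    pvLastOf (dl ++ [r]) = r.2 := by simp [pvLastOf]

theorem pvStartOf_concat (dl : List (Int × Int)) (r : Int × Int) :
    pvStartOf (dl ++ [r]) = r.1 := by simp [pvStartOf]

theorem pvLastOf_getLast (R : List (Int × Int)) (hne : R ≠ []) :
    pvLastOf R = (R.getLast hne).2 := by simp [pvLastOf, List.getLast?_eq_some_getLast hne]

theorem pvAccOf_open (dl : List (Int × Int)) (r : Int × Int) :
    pvAccOf (dl ++ [r]) true = pvAccOf (dl ++ [(r.1, r.1)]) false := by
  simp [pvAccOf, pvStartOf_concat]

theorem pvAccOf_true_eq (dl : List (Int × Int)) (r r' : Int × Int) (h : r.1 = r'.1) :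
    pvAccOf (dl ++ [r]) true = pvAccOf (dl ++ [r']) true := by
  simp [pvAccOf, pvStartOf_concat, h]

theorem pvAccOf_close (dl : List (Int × Int)) (r : Int × Int) (hne : r.1 ≠ r.2) :
    pvAccOf (dl ++ [r]) false = pvAccOf (dl ++ [r]) true ++ '-' :: PySem.Int.toChars r.2 := by
  simp only [pvAccOf, if_pos rfl, Bool.true_eq_false, if_neg, List.dropLast_concat,
    pvStartOf_concat, List.map_append, List.map_singleton]
  rw [pvJoinSnoc, pvJoinSnoc]
  simp [pvRenderRun, hne]

theorem pvAccOf_new (R : List (Int × Int)) (j : Int) :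
    pvAccOf (R ++ [(j, j)]) true = pvAccOf R false ++ pvSepOf R ++ PySem.Int.toChars j := by
  simp only [pvAccOf, if_pos rfl, Bool.true_eq_false, if_neg, List.dropLast_concat,
    pvStartOf_concat, List.map_append, List.map_singleton]
  rw [pvJoinSnoc]
  rcases eq_or_ne R [] with rfl | hne
  · simp [pvSepOf, pvRenderRun]
  · simp [pvSepOf, hne, pvRenderRun]

theorem pvSepOf_concat (R : List (Int × Int)) (r : Int × Int) :
    pvSepOf (R ++ [r]) = [','] := by simp [pvSepOf]

theorem pvStep_canon (R : List (Int × Int)) (o : Bool) (j : Int) (b : Bool)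
    (h : pvInv R o j) :
    pvStep (pvCanon R o) j b = pvCanon (if b then pvRunsStep R j else R) b := by
  obtain ⟨hj, hwf, hcase⟩ := h
  cases o with
  | false =>
    simp only [if_neg Bool.false_ne_true] at hcase
    have hnew : pvRunsStep R j = R ++ [(j, j)] := by
      apply pvRunsStep_new
      intro hne
      rcases hcase with h1 | h1
      · exact absurd h1 hne
      · have := pvLastOf_getLast R hne; omega
    cases b with
    | false =>
      simp [pvStep, pvCanon]
    | true =>
      simp only [if_pos rfl, hnew]
      simp [pvStep, pvCanon, pvAccOf_new, pvLastOf_concat, pvStartOf_concat, pvSepOf_concat]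
  | true =>
    obtain ⟨hne, hlast⟩ : R ≠ [] ∧ pvLastOf R = j - 1 := by simpa using hcase
    have hmemlast := List.getLast_mem hne
    have hwl := hwf _ hmemlast
    have hgl := pvLastOf_getLast R hne
    have hdec := List.dropLast_append_getLast hne
    have hstart : pvStartOf R = (R.getLast hne).1 := by
      conv_lhs => rw [← hdec]
      rw [pvStartOf_concat]
    cases b with
    | true =>
      have hext := pvRunsStep_ext R hne j (by omega)
      simp only [if_pos rfl, hext]
      simp only [pvStep, pvCanon, hstart, if_true, if_false]
      rw [if_pos (by omega : (R.getLast hne).1 ≥ 0), if_pos (by omega : j = pvLastOf R + 1)]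
      have hacc : pvAccOf R true = pvAccOf (R.dropLast ++ [((R.getLast hne).1, j)]) true := by
        conv_lhs => rw [← hdec]
        exact pvAccOf_true_eq _ _ _ rfl
      simp [hacc, pvLastOf_concat, pvStartOf_concat, pvSepOf_concat, pvSepOf, hne]
    | false =>
      simp only [if_neg Bool.false_ne_true]
      simp only [pvStep, pvCanon, hstart, if_true, if_false]
      rw [if_pos (by omega : (R.getLast hne).1 ≥ 0)]
      by_cases hab : (R.getLast hne).1 = pvLastOf R
      · rw [if_neg (by omega : ¬ (R.getLast hne).1 ≠ pvLastOf R)]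
        have hacc : pvAccOf R true = pvAccOf R false := by
          conv_lhs => rw [← hdec]
          rw [pvAccOf_open]
          have : ((R.getLast hne).1, (R.getLast hne).1) = R.getLast hne := by
            have : (R.getLast hne).1 = (R.getLast hne).2 := by omega
            exact Prod.ext rfl this
          rw [this, hdec]
        rw [hacc]
        simp
      · rw [if_pos (by omega : (R.getLast hne).1 ≠ pvLastOf R)]
        have hacc : pvAccOf R true ++ '-' :: PySem.Int.toChars (pvLastOf R) = pvAccOf R false := by
          conv_lhs => rw [← hdec]
          conv_rhs => rw [← hdec]
          rw [pvLastOf_concat, pvAccOf_close _ _ (by omega : (R.getLast hne).1 ≠ (R.getLast hne).2)]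
        rw [hacc]
        simp
        intro hlt
        exact absurd hlt (by omega)

theorem pvInv_step (R : List (Int × Int)) (o : Bool) (j : Int) (b : Bool)
    (h : pvInv R o j) :
    pvInv (if b then pvRunsStep R j else R) b (j + 1) := by
  obtain ⟨hj, hwf, hcase⟩ := h
  cases b with
  | false =>
    refine ⟨by omega, hwf, ?_⟩
    cases o with
    | true =>
      obtain ⟨hne, hlast⟩ := by simpa using hcase
      simp only [if_neg Bool.false_ne_true]
      right; omega
    | false =>
      simp only [if_neg Bool.false_ne_true] at hcase ⊢
      rcases hcase with h1 | h1
      · exact Or.inl h1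
      · right; omega
  | true =>
    simp only [if_pos rfl] at *
    cases o with
    | true =>
      obtain ⟨hne, hlast⟩ := by simpa using hcase
      have hg := pvLastOf_getLast R hne
      have hstep := pvRunsStep_ext R hne j (by omega)
      rw [hstep]
      have hmemlast := List.getLast_mem hne
      refine ⟨by omega, ?_, ?_⟩
      · intro r hr
        rcases List.mem_append.mp hr with hr | hr
        · exact hwf r (List.dropLast_sublist R |>.mem hr)
        · have hwl := hwf _ hmemlast
          simp only [List.mem_singleton] at hr
          subst hr; constructor
          · exact hwl.1
          · omega
      · simp [pvLastOf_concat]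
    | false =>
      have hnotext : ∀ (hne : R ≠ []), j ≠ (R.getLast hne).2 + 1 := by
        intro hne
        simp only [if_neg Bool.false_ne_true] at hcase
        rcases hcase with h1 | h1
        · exact absurd h1 hne
        · have := pvLastOf_getLast R hne; omega
      rw [pvRunsStep_new R j hnotext]
      refine ⟨by omega, ?_, ?_⟩
      · intro r hr
        rcases List.mem_append.mp hr with hr | hr
        · exact hwf r hr
        · simp only [List.mem_singleton] at hr; subst hr; exact ⟨hj, le_refl _⟩
      · simp [pvLastOf_concat]

theorem pvRunM_canon (fl : List Bool) :
    ∀ (j : Int) (R : List (Int × Int)) (o : Bool), pvInv R o j →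
      pvRunM fl j (pvCanon R o) =
        pvCanon ((pvTruePos fl j).foldl pvRunsStep R) (pvOpenAfter fl o) ∧
      pvInv ((pvTruePos fl j).foldl pvRunsStep R) (pvOpenAfter fl o) (j + fl.length) := by
  induction fl with
  | nil => intro j R o h; simpa [pvRunM, pvTruePos, pvOpenAfter] using h
  | cons b t ih =>
    intro j R o h
    have hstep := pvStep_canon R o j b h
    have hinv := pvInv_step R o j b h
    obtain ⟨ih1, ih2⟩ := ih (j + 1) (if b then pvRunsStep R j else R) b hinv
    have hfold : ((pvTruePos (b :: t) j).foldl pvRunsStep R) =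
        (pvTruePos t (j + 1)).foldl pvRunsStep (if b then pvRunsStep R j else R) := by
      cases b <;> simp [pvTruePos]
    have hopen : pvOpenAfter (b :: t) o = pvOpenAfter t b := rfl
    have hlen : j + (↑(b :: t).length : Int) = (j + 1) + (↑t.length : Int) := by
      simp; ring
    refine ⟨?_, ?_⟩
    · show pvRunM t (j + 1) (pvStep (pvCanon R o) j b) = _
      rw [hstep, ih1, hfold, hopen]
    · rw [hfold, hopen, hlen]; exact ih2

theorem pvFinal_canon (R : List (Int × Int)) (o : Bool) (j : Int) (h : pvInv R o j) :
    (match pvCanon R o with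
      | (acc, start, last, _, _) =>
        if start ≥ 0 ∧ start ≠ last then acc ++ '-' :: PySem.Int.toChars last else acc) =
      PySem.Chars.join [','] (R.map pvRenderRun) := by
  obtain ⟨hj, hwf, hcase⟩ := h
  cases o with
  | false =>
    simp [pvCanon, pvAccOf]
  | true =>
    obtain ⟨hne, hlast⟩ : R ≠ [] ∧ pvLastOf R = j - 1 := by simpa using hcase
    have hwl := hwf _ (List.getLast_mem hne)
    have hgl := pvLastOf_getLast R hne
    have hdec := List.dropLast_append_getLast hne
    have hstart : pvStartOf R = (R.getLast hne).1 := by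
      conv_lhs => rw [← hdec]
      rw [pvStartOf_concat]
    have hfalse : pvAccOf R false = PySem.Chars.join [','] (R.map pvRenderRun) := by
      simp [pvAccOf]
    simp only [pvCanon, if_true, hstart]
    by_cases hab : (R.getLast hne).1 = pvLastOf R
    · rw [if_neg (by omega : ¬ ((R.getLast hne).1 ≥ 0 ∧ (R.getLast hne).1 ≠ pvLastOf R))]
      rw [← hfalse]
      conv_lhs => rw [← hdec]
      rw [pvAccOf_open]
      have hr : ((R.getLast hne).1, (R.getLast hne).1) = R.getLast hne :=
        Prod.ext rfl (by omega)
      rw [hr, hdec]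
    · rw [if_pos ⟨by omega, by omega⟩]
      rw [← hfalse]
      conv_lhs => rw [← hdec]
      rw [pvLastOf_concat, ← pvAccOf_close _ _ (by omega : (R.getLast hne).1 ≠ (R.getLast hne).2)]
      rw [hdec]

theorem pvRunM_append (fl₁ fl₂ : List Bool) :
    ∀ (j : Int) (st : PvSt),
      pvRunM (fl₁ ++ fl₂) j st = pvRunM fl₂ (j + fl₁.length) (pvRunM fl₁ j st) := by
  induction fl₁ with
  | nil => intro j st; simp [pvRunM]
  | cons b t ih =>
    intro j st
    simp only [List.cons_append, pvRunM, ih]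
    congr 1
    push_cast [List.length_cons]
    ring

theorem pvTruePos_append (fl₁ fl₂ : List Bool) :
    ∀ (j : Int), pvTruePos (fl₁ ++ fl₂) j =
      pvTruePos fl₁ j ++ pvTruePos fl₂ (j + fl₁.length) := by
  induction fl₁ with
  | nil => intro j; simp [pvTruePos]
  | cons b t ih =>
    intro j
    simp only [List.cons_append, pvTruePos, ih]
    have : j + 1 + (t.length : Int) = j + ((t.length : Int) + 1) := by ring
    simp [this]

theorem pvAinner_eq (char : Char) (st : PvSt) (cnt i : Int) :
    pvAinner char (pvEmbed st cnt) i =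
      pvEmbed (pvStep st (i + cnt)
        (decide (PySem.Int.band (1 <<< i.toNat)
          ((PySem.Int.ofCharsBase? [char] 16).getD 0) ≠ 0))) cnt := by
  obtain ⟨acc, start, last, bit, sep⟩ := st
  by_cases h : PySem.Int.band (1 <<< i.toNat) ((PySem.Int.ofCharsBase? [char] 16).getD 0) ≠ 0 <;>
    simp [pvAinner, pvEmbed, pvStep, h] <;> split_ifs <;> simp

theorem pvAchar_eq (st : PvSt) (cnt : Int) (char : Char) :
    pvAchar (pvEmbed st cnt) char = pvEmbed (pvRunM (pvFlagsC char) cnt st) (cnt + 4) := by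
  have h4 : PySem.List.pyRange 0 4 1 = [0, 1, 2, 3] := by decide
  simp only [pvAchar, h4, List.foldl_cons, List.foldl_nil, pvAinner_eq, pvFlagsC, pvRunM]
  norm_num
  rw [show (1:Int) + cnt = cnt + 1 by ring, show (2:Int) + cnt = cnt + 1 + 1 by ring,
    show (3:Int) + cnt = cnt + 1 + 1 + 1 by ring]
  simp [pvEmbed]

theorem pvAfold_eq (chars : List Char) :
    ∀ (st : PvSt) (cnt : Int),
      chars.foldl pvAchar (pvEmbed st cnt) =
        pvEmbed (pvRunM (chars.flatMap pvFlagsC) cnt st) (cnt + 4 * chars.length) := by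
  induction chars with
  | nil => intro st cnt; simp [pvRunM]
  | cons c t ih =>
    intro st cnt
    rw [List.foldl_cons, pvAchar_eq, ih]
    rw [List.flatMap_cons, pvRunM_append]
    have hlen : (pvFlagsC c).length = 4 := by simp [pvFlagsC]
    rw [hlen]
    congr 1
    push_cast [List.length_cons]
    ring

theorem pvHexBits_inner (c : Char) (acc : List Int) (s : Int) :
    (PySem.List.pyRange 0 4 1).foldl (fun bits i =>
        if PySem.Int.band (1 <<< i.toNat) ((PySem.Int.ofCharsBase? [c] 16).getD 0) ≠ 0
        then bits ++ [i + 4 * s] else bits) acc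
      = acc ++ pvTruePos (pvFlagsC c) (4 * s) := by
  have h4 : PySem.List.pyRange 0 4 1 = [0, 1, 2, 3] := by decide
  set v := (PySem.Int.ofCharsBase? [c] 16).getD 0 with hv
  have e0 : (0 : Int) + 4 * s = 4 * s := by ring
  have e1 : (1 : Int) + 4 * s = 4 * s + 1 := by ring
  have e2 : (2 : Int) + 4 * s = 4 * s + 1 + 1 := by ring
  have e3 : (3 : Int) + 4 * s = 4 * s + 1 + 1 + 1 := by ring
  simp only [h4, List.foldl_cons, List.foldl_nil, pvFlagsC, pvTruePos, e0, e1, e2, e3]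
  by_cases h0 : PySem.Int.band 1 v = 0 <;>
  by_cases h1 : PySem.Int.band 2 v = 0 <;>
  by_cases h2 : PySem.Int.band 4 v = 0 <;>
  by_cases h3 : PySem.Int.band 8 v = 0 <;>
    simp [h0, h1, h2, h3, e0, e1, e2, e3, ← hv]

theorem pvHexBits_gen (l : List Char) :
    ∀ (s : Int) (acc : List Int),
      (PySem.List.enumerate l s).foldl (fun bits p =>
          let v := (PySem.Int.ofCharsBase? [p.2] 16).getD 0
          (PySem.List.pyRange 0 4 1).foldl (fun bits i =>
            if PySem.Int.band (1 <<< i.toNat) v ≠ 0 then bits ++ [i + 4 * p.1] else bits) bits)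
        acc
      = acc ++ pvTruePos (l.flatMap pvFlagsC) (4 * s) := by
  induction l with
  | nil => intro s acc; simp [PySem.List.enumerate, pvTruePos]
  | cons c t ih =>
    intro s acc
    rw [PySem.List.enumerate_cons, List.foldl_cons]
    show (PySem.List.enumerate t (s + 1)).foldl _
        ((PySem.List.pyRange 0 4 1).foldl (fun bits i =>
          if PySem.Int.band (1 <<< i.toNat) ((PySem.Int.ofCharsBase? [c] 16).getD 0) ≠ 0
          then bits ++ [i + 4 * s] else bits) acc) = _
    rw [pvHexBits_inner, ih, List.flatMap_cons, pvTruePos_append]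
    have hlen : (pvFlagsC c).length = 4 := by simp [pvFlagsC]
    rw [hlen]
    have : 4 * s + (4 : Int) = 4 * (s + 1) := by ring
    simp [this]

theorem pvHexBits_eq (mask : String) :
    pvHexBits mask = pvTruePos (mask.toList.reverse.flatMap pvFlagsC) 0 := by
  have := pvHexBits_gen mask.toList.reverse 0 []
  simpa [pvHexBits] using this

-- ===== VERDICT (by name: the statement is the Claim_ definition above) =====
theorem mask_to_range_py_spec : Claim_equal_mask_to_range_py := by
  intro mask _ _
  show mask_to_range_py mask = mask_to_range_py_alt mask
  unfold mask_to_range_py mask_to_range_py_alt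
  rw [PySem.List.slice?_none_none_neg_one, pvHexBits_eq]
  simp only [Option.getD_some]
  have hinit : (([], -1, 0, 0, 0, []) : List Char × Int × Int × Int × Int × List Char)
      = pvEmbed (pvCanon [] false) 0 := by
    simp [pvEmbed, pvCanon, pvAccOf, pvLastOf, pvStartOf, pvSepOf, PySem.Chars.join_nil]
  rw [hinit, pvAfold_eq]
  have hinv0 : pvInv [] false 0 :=
    ⟨le_refl 0, by simp, by simp⟩
  obtain ⟨heq, hinvf⟩ :=
    pvRunM_canon (mask.toList.reverse.flatMap pvFlagsC) 0 [] false hinv0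
  rw [heq]
  have hfin := pvFinal_canon _ _ _ hinvf
  simp only [pvEmbed]
  exact congrArg String.ofList hfin
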